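-- pv_equiv track=rewrite | github.com/elliotpk/d0020e | Src/ReferenceCalculator.py | tupleRotatorLister
-- ===== SOURCE A (Python) =====
-- from collections import deque
--
-- def tupleRotatorLister(tup):
--     rotations = len(tup)
--     rotList = []
--     tup = deque(tup)
--
--     while(rotations > 0):
--         rotList.append(tuple(tup))
--         tup.rotate(1)
--         rotations = rotations - 1
--
--     return rotList
-- ===== SOURCE B (Python) =====
-- def tupleRotatorLister(tup):
--     n = len(tup)
--     t = tuple(tup)
--     return [t[n - i:] + t[:n - i] for i in range(n)]
-- ===== Notes on version B (the rewrite author's own statement) =====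
-- stated objective: simpler
-- what changed: Each rotation is computed independently by slice concatenation over range(n) instead of incrementally mutating a deque with rotate(1) in a while loop.
import Mathlib
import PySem

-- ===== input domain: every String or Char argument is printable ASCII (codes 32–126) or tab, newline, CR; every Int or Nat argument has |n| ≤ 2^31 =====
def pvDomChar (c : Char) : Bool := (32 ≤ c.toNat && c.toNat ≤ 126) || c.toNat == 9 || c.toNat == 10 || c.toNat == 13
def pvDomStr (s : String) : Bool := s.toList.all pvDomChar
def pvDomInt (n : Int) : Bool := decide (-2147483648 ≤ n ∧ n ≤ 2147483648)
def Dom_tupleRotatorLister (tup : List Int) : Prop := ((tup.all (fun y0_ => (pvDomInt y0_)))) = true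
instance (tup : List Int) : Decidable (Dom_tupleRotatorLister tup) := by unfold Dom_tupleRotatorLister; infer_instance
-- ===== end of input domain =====

-- B computes each rotation independently by slice concatenation over range(n) instead of
-- incrementally mutating a deque; objective: simpler (same cost).


-- ===== PORT A =====
-- deque.rotate(1): move the last element (if any) to the front
def pvRot1 (l : List Int) : List Int :=
  match l.getLast? with
  | none => l
  | some x => x :: l.dropLast

-- the while loop: 'rotations' is the fuel, 'cur' the deque; append-then-rotate
def pvALoop : Nat → List Int → List (List Int)
  | 0, _ => []
  | k+1, cur => cur :: pvALoop k (pvRot1 cur)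

def tupleRotatorLister (tup : List Int) : List (List Int) :=
  pvALoop tup.length tup

-- ===== PORT B =====
-- [t[n-i:] + t[:n-i] for i in range(n)]
def tupleRotatorLister_alt (tup : List Int) : List (List Int) :=
  (List.range tup.length).map
    (fun i => tup.drop (tup.length - i) ++ tup.take (tup.length - i))

-- ===== PRECONDITION & SPEC =====
def Spec_tupleRotatorLister (tup : List Int) (out : List (List Int)) : Prop := out = tupleRotatorLister_alt tup
instance (tup : List Int) (out : List (List Int)) : Decidable (Spec_tupleRotatorLister tup out) := by unfold Spec_tupleRotatorLister; infer_instance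

-- ===== CLAIM (what is proved, stated in full; the proofs are below) =====
def Claim_equal_tupleRotatorLister : Prop := ∀ (tup : List Int), Dom_tupleRotatorLister tup → Spec_tupleRotatorLister tup (tupleRotatorLister tup)

-- ===== LEMMAS AND PROOFS =====

-- one deque rotation steps the slice decomposition down by one
theorem pvRot1_step (t : List Int) (m : Nat) (h1 : 1 ≤ m) (h2 : m ≤ t.length) :
    pvRot1 (t.drop m ++ t.take m) = t.drop (m-1) ++ t.take (m-1) := by
  have hm1 : m - 1 < t.length := by omega
  have htake : t.take m ≠ [] := by
    have hl : (t.take m).length = m := by simp; omega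
    intro h
    rw [h] at hl
    simp at hl
    omega
  unfold pvRot1
  rw [List.getLast?_append_of_ne_nil _ htake]
  have hlast : (t.take m).getLast? = some (t[m-1]'hm1) := by
    rw [List.getLast?_eq_getElem?]
    have hlen : (t.take m).length = m := by simp; omega
    rw [hlen]
    rw [List.getElem?_take_of_lt (by omega)]
    exact List.getElem?_eq_getElem hm1
  rw [hlast]
  simp only []
  rw [List.dropLast_append_of_ne_nil htake]
  have hdl : (t.take m).dropLast = t.take (m-1) := by
    have hl2 : (t.take m).length = m := by simp; omega
    rw [List.dropLast_eq_take, hl2, List.take_take]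
    congr 1
    omega
  rw [hdl]
  have hdrop : t.drop (m-1) = t[m-1]'hm1 :: t.drop m := by
    have h : m - 1 + 1 = m := by omega
    rw [List.drop_eq_getElem_cons hm1, h]
  rw [hdrop]
  simp

theorem pvALoop_eq (t : List Int) (k : Nat) (hk : k ≤ t.length) :
    pvALoop k (t.drop k ++ t.take k) =
      (List.range' (t.length - k) k).map
        (fun i => t.drop (t.length - i) ++ t.take (t.length - i)) := by
  induction k with
  | zero => simp [pvALoop]
  | succ k ih =>
    rw [pvALoop]
    rw [pvRot1_step t (k+1) (by omega) hk]
    simp only [Nat.add_sub_cancel]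
    rw [ih (by omega)]
    rw [List.range'_succ]
    simp only [List.map_cons]
    have h1 : t.length - (t.length - (k+1)) = k + 1 := by omega
    have h2 : t.length - (k+1) + 1 = t.length - k := by omega
    rw [h1, h2]

-- ===== VERDICT (by name: the statement is the Claim_ definition above) =====
theorem tupleRotatorLister_spec : Claim_equal_tupleRotatorLister := by
  intro tup _
  unfold Spec_tupleRotatorLister tupleRotatorLister tupleRotatorLister_alt
  have := pvALoop_eq tup tup.length (le_refl _)
  simpa [List.range_eq_range'] using this
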